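-- pv_equiv track=rewrite | github.com/issy13elizabet/ZION2.7TestNet | zion/ai/lightning_ai.py | _calculate_optimal_payment_splits
-- ===== SOURCE A (Python) =====
-- from typing import Dict, List, Optional, Tuple, Any, Union, Set
--
-- def _calculate_optimal_payment_splits(amount: int, max_splits: int) -> List[int]:
--     """Calculate optimal payment amount splits"""
--     if amount <= 1000000:  # Small payments don't need splitting
--         return [amount]
--
--     # Fibonacci-based splitting for efficiency
--     splits = []
--     remaining = amount
--     split_count = min(max_splits, 5)  # Max 5 splits
--
--     for i in range(split_count - 1):
--         split_size = remaining // (split_count - i)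
--         splits.append(split_size)
--         remaining -= split_size
--
--     if remaining > 0:
--         splits.append(remaining)
--
--     return splits
-- ===== SOURCE B (Python) =====
-- def _calculate_optimal_payment_splits(amount: int, max_splits: int):
--     """Closed-form equal split: floor parts first, then ceil parts."""
--     if amount <= 1000000:
--         return [amount]
--     n = min(max_splits, 5)
--     if n <= 0:
--         return [amount]
--     q, r = divmod(amount, n)
--     return [q] * (n - r) + [q + 1] * r
-- ===== Notes on version B (the rewrite author's own statement) =====
-- stated objective: simpler
-- what changed: Replaced the greedy remaining-floor loop with the closed-form divmod split: [q]*(n-r)+[q+1]*r.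
import Mathlib
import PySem

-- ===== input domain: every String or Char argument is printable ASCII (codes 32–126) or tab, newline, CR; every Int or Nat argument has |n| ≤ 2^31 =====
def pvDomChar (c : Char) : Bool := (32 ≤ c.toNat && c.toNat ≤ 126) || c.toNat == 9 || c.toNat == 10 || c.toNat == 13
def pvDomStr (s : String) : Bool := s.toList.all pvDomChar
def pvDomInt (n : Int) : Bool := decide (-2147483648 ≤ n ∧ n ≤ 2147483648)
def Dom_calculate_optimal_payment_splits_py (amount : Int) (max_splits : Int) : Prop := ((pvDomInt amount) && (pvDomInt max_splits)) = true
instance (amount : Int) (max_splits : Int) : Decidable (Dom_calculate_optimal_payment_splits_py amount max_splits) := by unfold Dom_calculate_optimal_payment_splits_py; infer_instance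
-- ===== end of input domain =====

-- B replaces A's greedy remaining-floor loop with the closed-form divmod split [q]*(n-r) ++ [q+1]*r (simpler; same cost).

-- ===== PORT A =====
def calculate_optimal_payment_splits_py (amount : Int) (max_splits : Int) : List Int :=
  if amount ≤ 1000000 then [amount]
  else
    let split_count := min max_splits 5
    let st := (PySem.List.pyRange 0 (split_count - 1) 1).foldl
      (fun (st : List Int × Int) i =>
        let split_size := PySem.Int.floordiv st.2 (split_count - i)
        (st.1 ++ [split_size], st.2 - split_size)) ([], amount)
    if st.2 > 0 then st.1 ++ [st.2] else st.1

-- ===== PORT B =====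
def calculate_optimal_payment_splits_py_alt (amount : Int) (max_splits : Int) : List Int :=
  if amount ≤ 1000000 then [amount]
  else
    let n := min max_splits 5
    if n ≤ 0 then [amount]
    else
      let q := PySem.Int.floordiv amount n
      let r := PySem.Int.mod amount n
      List.replicate (n - r).toNat q ++ List.replicate r.toNat (q + 1)

-- ===== PRECONDITION & SPEC =====
def Spec_calculate_optimal_payment_splits_py (amount : Int) (max_splits : Int) (out : List Int) : Prop := out = calculate_optimal_payment_splits_py_alt amount max_splits
instance (amount : Int) (max_splits : Int) (out : List Int) : Decidable (Spec_calculate_optimal_payment_splits_py amount max_splits out) := by unfold Spec_calculate_optimal_payment_splits_py; infer_instance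

-- ===== CLAIM (what is proved, stated in full; the proofs are below) =====
def Claim_equal_calculate_optimal_payment_splits_py : Prop := ∀ (amount : Int) (max_splits : Int), Dom_calculate_optimal_payment_splits_py amount max_splits → Spec_calculate_optimal_payment_splits_py amount max_splits (calculate_optimal_payment_splits_py amount max_splits)

-- ===== LEMMAS AND PROOFS =====

theorem pv_main (a m : Int) : calculate_optimal_payment_splits_py a m = calculate_optimal_payment_splits_py_alt a m := by
  by_cases ha : a ≤ 1000000
  · simp [calculate_optimal_payment_splits_py, calculate_optimal_payment_splits_py_alt, ha]
  · have h5 : min m 5 ≤ 5 := min_le_right _ _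
    rcases show min m 5 ≤ 1 ∨ min m 5 = 2 ∨ min m 5 = 3 ∨ min m 5 = 4 ∨ min m 5 = 5 from by omega
      with h | h | h | h | h
    · -- split_count ≤ 1: the loop body never runs and both sides return [a]
      have h0 : ((min m 5 - 1 - 0).toNat) = 0 := by omega
      simp only [calculate_optimal_payment_splits_py, calculate_optimal_payment_splits_py_alt,
        if_neg ha, PySem.List.pyRange_one, h0, List.range_zero, List.map_nil, List.foldl_nil]
      by_cases hk0 : min m 5 ≤ 0
      · rw [if_pos hk0, if_pos (show a > 0 by omega)]
        simp
      · have hk1 : min m 5 = 1 := by omega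
        rw [hk1]
        norm_num [PySem.Int.floordiv_eq_ediv_of_pos, PySem.Int.mod_eq_emod_of_pos]
        omega
    · -- split_count = 2
      simp only [calculate_optimal_payment_splits_py, calculate_optimal_payment_splits_py_alt,
        if_neg ha, h, show PySem.List.pyRange 0 ((2:Int) - 1) 1 = [0] from by decide,
        List.foldl]
      norm_num [PySem.Int.floordiv_eq_ediv_of_pos, PySem.Int.mod_eq_emod_of_pos]
      split_ifs with hpos
      · rcases show a % 2 = 0 ∨ a % 2 = 1 from by omega with hr | hr <;> rw [hr] <;>
          simp [List.replicate] <;> omega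
      · exfalso; omega
    · -- split_count = 3
      simp only [calculate_optimal_payment_splits_py, calculate_optimal_payment_splits_py_alt,
        if_neg ha, h, show PySem.List.pyRange 0 ((3:Int) - 1) 1 = [0, 1] from by decide,
        List.foldl]
      norm_num [PySem.Int.floordiv_eq_ediv_of_pos, PySem.Int.mod_eq_emod_of_pos]
      split_ifs with hpos
      · rcases show a % 3 = 0 ∨ a % 3 = 1 ∨ a % 3 = 2 from by omega with hr | hr | hr <;> rw [hr] <;>
          simp [List.replicate] <;> omega
      · exfalso; omega
    · -- split_count = 4
      simp only [calculate_optimal_payment_splits_py, calculate_optimal_payment_splits_py_alt,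
        if_neg ha, h, show PySem.List.pyRange 0 ((4:Int) - 1) 1 = [0, 1, 2] from by decide,
        List.foldl]
      norm_num [PySem.Int.floordiv_eq_ediv_of_pos, PySem.Int.mod_eq_emod_of_pos]
      split_ifs with hpos
      · rcases show a % 4 = 0 ∨ a % 4 = 1 ∨ a % 4 = 2 ∨ a % 4 = 3 from by omega with hr | hr | hr | hr <;> rw [hr] <;>
          simp [List.replicate] <;> omega
      · exfalso; omega
    · -- split_count = 5
      simp only [calculate_optimal_payment_splits_py, calculate_optimal_payment_splits_py_alt,
        if_neg ha, h, show PySem.List.pyRange 0 ((5:Int) - 1) 1 = [0, 1, 2, 3] from by decide,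
        List.foldl]
      norm_num [PySem.Int.floordiv_eq_ediv_of_pos, PySem.Int.mod_eq_emod_of_pos]
      split_ifs with hpos
      · rcases show a % 5 = 0 ∨ a % 5 = 1 ∨ a % 5 = 2 ∨ a % 5 = 3 ∨ a % 5 = 4 from by omega with hr | hr | hr | hr | hr <;> rw [hr] <;>
          simp [List.replicate] <;> omega
      · exfalso; omega

-- ===== VERDICT (by name: the statement is the Claim_ definition above) =====
theorem calculate_optimal_payment_splits_py_spec : Claim_equal_calculate_optimal_payment_splits_py := by
  intro a m _
  exact pv_main a m
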